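-- pv_equiv track=rewrite | github.com/eighteyes/know-cli | know/src/utils.py | find_fuzzy_match
-- ===== SOURCE A (Python) =====
-- from typing import Optional, Tuple, List, Dict, Any
--
-- def find_fuzzy_match(query: str, candidates: List[str], threshold: int = 2) -> List[str]:
--     """
--     Find fuzzy matches for a query string.
--
--     Args:
--         query: Query string
--         candidates: List of candidate strings
--         threshold: Maximum edit distance for a match
--
--     Returns:
--         List of matching candidates
--     """
--     query_lower = query.lower()
--     matches = []
--
--     for candidate in candidates:
--         candidate_lower = candidate.lower()
--
--         # Exact match
--         if query_lower == candidate_lower: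
--             matches.append(candidate)
--             continue
--
--         # Substring match
--         if query_lower in candidate_lower:
--             matches.append(candidate)
--             continue
--
--         # Simple edit distance check (Levenshtein)
--         distance = _edit_distance(query_lower, candidate_lower)
--         if distance <= threshold:
--             matches.append(candidate)
--
--     return matches
--
-- def _edit_distance(s1: str, s2: str) -> int:
--     """
--     Calculate Levenshtein edit distance between two strings.
--
--     Args:
--         s1: First string
--         s2: Second string
--
--     Returns:
--         Edit distance
--     """
--     if len(s1) < len(s2):
--         return _edit_distance(s2, s1)
--
--     if len(s2) == 0:
--         return len(s1)
--
--     previous_row = range(len(s2) + 1)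
--     for i, c1 in enumerate(s1):
--         current_row = [i + 1]
--         for j, c2 in enumerate(s2):
--             # Cost of insertions, deletions, or substitutions
--             insertions = previous_row[j + 1] + 1
--             deletions = current_row[j] + 1
--             substitutions = previous_row[j] + (c1 != c2)
--             current_row.append(min(insertions, deletions, substitutions))
--         previous_row = current_row
--
--     return previous_row[-1]
-- ===== SOURCE B (Python) =====
-- from typing import List
--
--
-- def find_fuzzy_match(query: str, candidates: List[str], threshold: int = 2) -> List[str]:
--     """Keep candidates whose lowercased form contains the query or lies within
--     `threshold` edits of it; the edit distance is computed by an anti-diagonal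
--     (wavefront) dynamic programme instead of row by row."""
--     q = query.lower()
--     return [c for c in candidates
--             if q in c.lower() or _diagonal_distance(q, c.lower()) <= threshold]
--
--
-- def _diagonal_distance(a: str, b: str) -> int:
--     """Levenshtein distance, filling the DP table one anti-diagonal at a time.
--
--     Cells on an anti-diagonal i + j = d depend only on the two previous
--     diagonals, which are kept as dicts keyed by the row index i; no argument
--     swap is needed since the wavefront treats both strings symmetrically."""
--     n, m = len(a), len(b)
--     d2 = {}
--     d1 = {}
--     for d in range(n + m + 1):
--         cur = {}
--         for i in range(d + 1):
--             j = d - i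
--             if i > n or j > m:
--                 continue
--             if i == 0:
--                 cur[i] = j
--             elif j == 0:
--                 cur[i] = i
--             else:
--                 cur[i] = min(d1[i - 1] + 1, d1[i] + 1,
--                              d2[i - 1] + (a[i - 1] != b[j - 1]))
--         d2, d1 = d1, cur
--     return d1[n]
-- ===== Notes on version B (the rewrite author's own statement) =====
-- stated objective: alternative
-- what changed: B replaces A's row-by-row two-list Levenshtein (with its length-swap and three-branch candidate loop) by an anti-diagonal wavefront DP that fills the table one anti-diagonal at a time, keeping the two previous diagonals as dicts keyed by row index, and filters candidates with a single substring-or-distance predicate; same asymptotic cost, no speed claim.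
import Mathlib
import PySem

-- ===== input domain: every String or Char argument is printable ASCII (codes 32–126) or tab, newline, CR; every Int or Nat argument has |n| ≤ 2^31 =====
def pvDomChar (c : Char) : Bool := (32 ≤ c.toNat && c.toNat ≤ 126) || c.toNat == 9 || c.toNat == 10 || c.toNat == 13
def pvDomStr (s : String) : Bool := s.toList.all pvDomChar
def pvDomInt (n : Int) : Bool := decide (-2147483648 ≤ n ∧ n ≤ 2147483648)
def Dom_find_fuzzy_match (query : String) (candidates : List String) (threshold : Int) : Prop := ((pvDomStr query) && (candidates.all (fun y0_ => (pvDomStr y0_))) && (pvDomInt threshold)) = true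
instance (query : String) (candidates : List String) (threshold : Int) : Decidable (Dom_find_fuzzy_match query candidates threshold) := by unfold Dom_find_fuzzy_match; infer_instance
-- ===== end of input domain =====

-- B replaces A's row-by-row two-list Levenshtein (with its length swap and three-branch
-- candidate loop) by an anti-diagonal wavefront DP over two diagonal dicts, filtering
-- candidates with one substring-or-distance predicate (objective: alternative; same
-- return value everywhere, no speed claim).

-- ===== PORT A =====
-- (c1 != c2) as an int
def pvDelta (c1 c2 : Char) : Int := if c1 ≠ c2 then 1 else 0

-- inner 'for j, c2 in enumerate(s2)' loop of _edit_distance: state = (current_row, j)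
def pvRowA (prev : List Int) (i : Int) (c1 : Char) (s2 : List Char) : List Int :=
  (s2.foldl
    (fun (st : List Int × Int) c2 =>
      (st.1 ++ [min (PySem.List.pyGetD prev (st.2 + 1) 0 + 1)
                 (min (PySem.List.pyGetD st.1 st.2 0 + 1)
                      (PySem.List.pyGetD prev st.2 0 + pvDelta c1 c2))],
       st.2 + 1))
    ([i + 1], 0)).1

-- outer 'for i, c1 in enumerate(s1)' loop: state = (previous_row, i)
def pvOuterA (s2 : List Char) (st : List Int × Int) (s1rest : List Char) : List Int × Int :=
  s1rest.foldl (fun st c1 => (pvRowA st.1 st.2 c1 s2, st.2 + 1)) st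

-- _edit_distance after the one-shot argument swap (the 'if len(s1) < len(s2)' recursion
-- immediately re-enters with swapped arguments, so it is transliterated as a wrapper)
def pvEditCore (s1 s2 : List Char) : Int :=
  if s2.length = 0 then (s1.length : Int)
  else PySem.List.pyGetD
    (pvOuterA s2 (PySem.List.pyRange 0 ((s2.length : Int) + 1) 1, 0) s1).1 (-1) 0

def pvEditDistance (s1 s2 : List Char) : Int :=
  if s1.length < s2.length then pvEditCore s2 s1 else pvEditCore s1 s2

def find_fuzzy_match (query : String) (candidates : List String) (threshold : Int) : List String :=
  let ql := PySem.Str.lower query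
  candidates.foldl
    (fun acc candidate =>
      let cl := PySem.Str.lower candidate
      if ql = cl then acc ++ [candidate]
      else if PySem.Str.isIn ql cl then acc ++ [candidate]
      else if pvEditDistance ql.toList cl.toList ≤ threshold then acc ++ [candidate]
      else acc)
    []

-- ===== PORT B =====
-- inner 'for i in range(d + 1)' loop of _diagonal_distance: the cells of anti-diagonal d
-- (the Python local 'j = d - i' is inlined as 'd - i').
-- Python indexes d1[i-1], d1[i], d2[i-1] and a[i-1], b[j-1] directly; on reachable states
-- these keys/indices are always present/in range (the band invariant GoodDiag below), so
-- Dict.getD / pyGetD with a default is exact here.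
def pvDiagRow (a b : List Char) (n m : Int) (d2 d1 : PySem.Dict Int Int) (d : Int) :
    PySem.Dict Int Int :=
  (PySem.List.pyRange 0 (d + 1) 1).foldl
    (fun cur i =>
      if i > n ∨ d - i > m then cur
      else if i = 0 then cur.insert i (d - i)
      else if d - i = 0 then cur.insert i i
      else cur.insert i
        (min (d1.getD (i - 1) 0 + 1)
          (min (d1.getD i 0 + 1)
            (d2.getD (i - 1) 0 +
              (if PySem.List.pyGetD a (i - 1) ' ' ≠ PySem.List.pyGetD b (d - i - 1) ' '
               then (1 : Int) else 0)))))
    PySem.Dict.empty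

-- 'for d in range(n + m + 1)' with state (d2, d1); returns d1[n] (always present, so getD is exact)
def pvDiagDist (a b : List Char) : Int :=
  let n : Int := a.length
  let m : Int := b.length
  let fin :=
    (PySem.List.pyRange 0 (n + m + 1) 1).foldl
      (fun (st : PySem.Dict Int Int × PySem.Dict Int Int) d =>
        (st.2, pvDiagRow a b n m st.1 st.2 d))
      (PySem.Dict.empty, PySem.Dict.empty)
  fin.2.getD n 0

def find_fuzzy_match_alt (query : String) (candidates : List String) (threshold : Int) : List String :=
  let ql := PySem.Str.lower query
  candidates.filter
    (fun c =>
      let cl := PySem.Str.lower c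
      PySem.Str.isIn ql cl || decide (pvDiagDist ql.toList cl.toList ≤ threshold))

-- ===== PRECONDITION & SPEC =====
def Spec_find_fuzzy_match (query : String) (candidates : List String) (threshold : Int) (out : List String) : Prop := out = find_fuzzy_match_alt query candidates threshold
instance (query : String) (candidates : List String) (threshold : Int) (out : List String) : Decidable (Spec_find_fuzzy_match query candidates threshold out) := by unfold Spec_find_fuzzy_match; infer_instance

-- ===== CLAIM (what is proved, stated in full; the proofs are below) =====
def Claim_equal_find_fuzzy_match : Prop := ∀ (query : String) (candidates : List String) (threshold : Int), Dom_find_fuzzy_match query candidates threshold → Spec_find_fuzzy_match query candidates threshold (find_fuzzy_match query candidates threshold)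

-- ===== LEMMAS AND PROOFS =====

-- the prefix table of the Levenshtein recurrence: levP a b i j = D[i][j]
def levP (a b : List Char) : Nat → Nat → Int
  | 0, j => (j : Int)
  | i + 1, 0 => (i : Int) + 1
  | i + 1, j + 1 =>
      min (levP a b i (j + 1) + 1)
        (min (levP a b (i + 1) j + 1)
          (levP a b i j + pvDelta (a.getD i ' ') (b.getD j ' ')))
  termination_by i j => i + j

lemma levP_zero_right (a b : List Char) (i : Nat) : levP a b i 0 = (i : Int) := by
  cases i <;> simp [levP]

lemma levP_comm (a b : List Char) : (i j : Nat) → levP a b i j = levP b a j i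
  | 0, 0 => by simp [levP]
  | 0, j + 1 => by simp [levP]
  | i + 1, 0 => by simp [levP]
  | i + 1, j + 1 => by
      have h1 := levP_comm a b i (j + 1)
      have h2 := levP_comm a b (i + 1) j
      have h3 := levP_comm a b i j
      have hd : pvDelta (a.getD i ' ') (b.getD j ' ') = pvDelta (b.getD j ' ') (a.getD i ' ') := by
        unfold pvDelta
        by_cases h : a.getD i ' ' = b.getD j ' ' <;> simp [h, Ne, eq_comm]
      simp only [levP, h1, h2, h3, hd]
      omega
  termination_by i j => i + j

-- ---------- A side: the row DP computes levP ----------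

-- structural description of one DP row
def pvRowS (c1 : Char) : List Char → List Int → Int → List Int
  | [], _, h => [h]
  | cb :: bs, p0 :: p1 :: ps, h =>
      h :: pvRowS c1 bs (p1 :: ps) (min (p1 + 1) (min (h + 1) (p0 + pvDelta c1 cb)))
  | _ :: _, [], h => [h]
  | _ :: _, [_], h => [h]

-- the index-based inner fold of port A computes pvRowS
lemma pvRowA_inner (c1 : Char) (prev : List Int) (bs : List Char) (cur : List Int) (j : Nat)
    (hne : cur ≠ []) (hcur : cur.length = j + 1) (hprev : prev.length = j + 1 + bs.length) :
    (bs.foldl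
      (fun (st : List Int × Int) c2 =>
        (st.1 ++ [min (PySem.List.pyGetD prev (st.2 + 1) 0 + 1)
                   (min (PySem.List.pyGetD st.1 st.2 0 + 1)
                        (PySem.List.pyGetD prev st.2 0 + pvDelta c1 c2))],
         st.2 + 1))
      (cur, (j : Int))).1
    = cur.dropLast ++ pvRowS c1 bs (prev.drop j) (cur.getLast hne) := by
  induction bs generalizing cur j with
  | nil => simp [pvRowS, List.dropLast_append_getLast]
  | cons cb bs ih =>
      have hp : prev.length = j + 1 + (bs.length + 1) := by simpa using hprev
      have hlen : (prev.drop j).length = bs.length + 2 := by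
        rw [List.length_drop]; omega
      rcases hd : prev.drop j with _ | ⟨p0, _ | ⟨p1, ps⟩⟩ <;> rw [hd] at hlen <;> simp at hlen
      have h1 : PySem.List.pyGetD prev (((j + 1 : Nat) : Int)) 0 = p1 := by
        rw [PySem.List.pyGetD_natCast]
        have h2 : prev[j + 1]? = some p1 := by
          have h3 := List.getElem?_drop (xs := prev) (i := j) (j := 1)
          rw [hd] at h3; simpa using h3.symm
        simp [List.getD_eq_getElem?_getD, h2]
      have h0 : PySem.List.pyGetD prev ((j : Int)) 0 = p0 := by
        rw [PySem.List.pyGetD_natCast]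
        have h2 : prev[j]? = some p0 := by
          have h3 := List.getElem?_drop (xs := prev) (i := j) (j := 0)
          rw [hd] at h3; simpa using h3.symm
        simp [List.getD_eq_getElem?_getD, h2]
      have hc : PySem.List.pyGetD cur ((j : Int)) 0 = cur.getLast hne := by
        rw [PySem.List.pyGetD_natCast]
        have h2 : cur[j]? = some (cur.getLast hne) := by
          have h3 : cur.getLast? = cur[cur.length - 1]? := List.getLast?_eq_getElem?
          rw [List.getLast?_eq_some_getLast hne] at h3
          rw [hcur] at h3; simpa using h3.symm
        simp [List.getD_eq_getElem?_getD, h2]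
      have hcast : (j : Int) + 1 = ((j + 1 : Nat) : Int) := by push_cast; ring
      have hd1 : prev.drop (j + 1) = p1 :: ps := by
        have h3 : prev.drop (j + 1) = (prev.drop j).tail := (List.tail_drop (l := prev) (i := j)).symm
        rw [h3, hd]; rfl
      simp only [List.foldl_cons, hcast, h1, h0, hc]
      rw [ih (cur ++ [min (p1 + 1) (min (cur.getLast hne + 1) (p0 + pvDelta c1 cb))]) (j + 1)
        (by simp) (by simp [hcur]) (by omega)]
      rw [hd1]
      simp only [pvRowS, List.dropLast_concat]
      rw [List.getLast_concat]
      rw [show cur.getLast hne :: pvRowS c1 bs (p1 :: ps)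
            (min (p1 + 1) (min (cur.getLast hne + 1) (p0 + pvDelta c1 cb)))
          = [cur.getLast hne] ++ pvRowS c1 bs (p1 :: ps)
            (min (p1 + 1) (min (cur.getLast hne + 1) (p0 + pvDelta c1 cb))) from rfl,
        ← List.append_assoc, List.dropLast_append_getLast]

lemma pvRowA_eq_rowS (prev : List Int) (i : Int) (c1 : Char) (s2 : List Char)
    (hprev : prev.length = s2.length + 1) :
    pvRowA prev i c1 s2 = pvRowS c1 s2 prev (i + 1) := by
  have h := pvRowA_inner c1 prev s2 [i + 1] 0 (by simp) (by simp) (by omega)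
  simpa [pvRowA] using h

-- row i of the table, as a list
def pvRowOf (a b : List Char) (i : Nat) : List Int :=
  (List.range (b.length + 1)).map (fun j => levP a b i j)

lemma pvRowOf_length (a b : List Char) (i : Nat) : (pvRowOf a b i).length = b.length + 1 := by
  simp [pvRowOf]

lemma pvRowOf_drop_cons (a b : List Char) (i j0 : Nat) (h : j0 ≤ b.length) :
    (pvRowOf a b i).drop j0 = levP a b i j0 :: (pvRowOf a b i).drop (j0 + 1) := by
  rw [List.drop_eq_getElem_cons (by simp [pvRowOf]; omega)]
  simp [pvRowOf]

lemma pvRowS_map (a b : List Char) (i : Nat) :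
    ∀ (bs : List Char) (j0 : Nat), bs = b.drop j0 → j0 ≤ b.length →
    pvRowS (a.getD i ' ') bs ((pvRowOf a b i).drop j0) (levP a b (i + 1) j0)
      = (pvRowOf a b (i + 1)).drop j0 := by
  intro bs
  induction bs with
  | nil =>
      intro j0 hbs hle
      have hj0 : j0 = b.length := by
        have := congrArg List.length hbs
        simp [List.length_drop] at this
        omega
      subst hj0
      have hdrop : (pvRowOf a b (i + 1)).drop (b.length + 1) = [] := by
        apply List.drop_of_length_le; simp [pvRowOf]
      rw [pvRowOf_drop_cons a b (i + 1) b.length le_rfl, hdrop]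
      simp [pvRowS]
  | cons cb bs ih =>
      intro j0 hbs hle
      have hj0 : j0 < b.length := by
        have := congrArg List.length hbs
        simp [List.length_drop] at this
        omega
      have hsplit : b.drop j0 = b[j0] :: b.drop (j0 + 1) := List.drop_eq_getElem_cons hj0
      rw [hsplit] at hbs
      have hcb : cb = b.getD j0 ' ' := by
        simp [List.getD_eq_getElem?_getD, List.getElem?_eq_getElem hj0]
        exact (List.cons.injEq _ _ _ _ ▸ hbs).1
      have hbs' : bs = b.drop (j0 + 1) := (List.cons.injEq _ _ _ _ ▸ hbs).2
      rw [pvRowOf_drop_cons a b i j0 (le_of_lt hj0),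
          pvRowOf_drop_cons a b i (j0 + 1) hj0]
      simp only [pvRowS]
      have hmin : min (levP a b i (j0 + 1) + 1)
          (min (levP a b (i + 1) j0 + 1)
            (levP a b i j0 + pvDelta (a.getD i ' ') cb)) = levP a b (i + 1) (j0 + 1) := by
        rw [hcb]; simp [levP]
      rw [hmin, ← pvRowOf_drop_cons a b i (j0 + 1) hj0, ih (j0 + 1) hbs' hj0,
          ← pvRowOf_drop_cons a b (i + 1) j0 (le_of_lt hj0)]

lemma pvRowA_rowOf (a b : List Char) (k : Nat) :
    pvRowA (pvRowOf a b k) (k : Int) (a.getD k ' ') b = pvRowOf a b (k + 1) := by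
  rw [pvRowA_eq_rowS _ _ _ _ (pvRowOf_length a b k)]
  have h0 : ((k : Int) + 1) = levP a b (k + 1) 0 := by simp [levP]
  rw [h0]
  have := pvRowS_map a b k b 0 (by simp) (by omega)
  simpa using this

lemma pvOuter_rowOf (a b : List Char) :
    ∀ (rest : List Char) (k : Nat), rest = a.drop k → k ≤ a.length →
    (pvOuterA b (pvRowOf a b k, (k : Int)) rest).1 = pvRowOf a b a.length := by
  intro rest
  induction rest with
  | nil =>
      intro k hrest hle
      have hk : k = a.length := by
        have := congrArg List.length hrest
        simp [List.length_drop] at this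
        omega
      subst hk
      simp [pvOuterA]
  | cons c1 rest ih =>
      intro k hrest hle
      have hk : k < a.length := by
        have := congrArg List.length hrest
        simp [List.length_drop] at this
        omega
      have hsplit : a.drop k = a[k] :: a.drop (k + 1) := List.drop_eq_getElem_cons hk
      rw [hsplit] at hrest
      have hc1 : c1 = a.getD k ' ' := by
        simp [List.getD_eq_getElem?_getD, List.getElem?_eq_getElem hk]
        exact (List.cons.injEq _ _ _ _ ▸ hrest).1
      have hrest' : rest = a.drop (k + 1) := (List.cons.injEq _ _ _ _ ▸ hrest).2
      have hstep : pvOuterA b (pvRowOf a b k, (k : Int)) (c1 :: rest)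
          = pvOuterA b (pvRowOf a b (k + 1), ((k + 1 : Nat) : Int)) rest := by
        simp only [pvOuterA, List.foldl_cons]
        rw [hc1, pvRowA_rowOf a b k]
        norm_num
      rw [hstep]
      exact ih (k + 1) hrest' hk

lemma pvRowOf_zero (a b : List Char) :
    PySem.List.pyRange 0 ((b.length : Int) + 1) 1 = pvRowOf a b 0 := by
  rw [PySem.List.pyRange_one]
  unfold pvRowOf
  have hn : (((b.length : Int) + 1 - 0).toNat) = b.length + 1 := by omega
  rw [hn]
  apply List.map_congr_left
  intro j hj
  simp [levP]

lemma pvEditCore_eq (s1 s2 : List Char) :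
    pvEditCore s1 s2 = levP s1 s2 s1.length s2.length := by
  unfold pvEditCore
  split_ifs with h
  · rw [List.length_eq_zero_iff] at h
    subst h
    simp [levP_zero_right]
  · rw [pvRowOf_zero s1 s2]
    have h0 := pvOuter_rowOf s1 s2 s1 0 (by simp) (by omega)
    norm_num at h0
    rw [h0]
    unfold pvRowOf
    rw [List.range_succ, List.map_append]
    simp [PySem.List.pyGetD_neg_one_append_singleton]

lemma pvEditDistance_eq (a b : List Char) :
    pvEditDistance a b = levP a b a.length b.length := by
  unfold pvEditDistance
  split_ifs with h
  · rw [pvEditCore_eq, levP_comm]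
  · exact pvEditCore_eq a b

-- ---------- B side: the wavefront DP computes levP ----------

-- the dict holding anti-diagonal d maps exactly the in-band row indices to table cells
def GoodDiag (a b : List Char) (d : Int) (dd : PySem.Dict Int Int) : Prop :=
  ∀ k : Int, dd.get? k =
    if max 0 (d - (b.length : Int)) ≤ k ∧ k ≤ min (a.length : Int) d then
      some (levP a b k.toNat (d - k).toNat)
    else none

lemma goodDiag_empty (a b : List Char) (d : Int) (hd : d < 0) :
    GoodDiag a b d PySem.Dict.empty := by
  intro k
  rw [PySem.Dict.get?_empty]
  split_ifs with h
  · exfalso; omega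
  · rfl

-- the inserted value of an interior in-band cell (i, d - i) equals the levP cell
lemma pvDiag_cell (a b : List Char) (d : Int) (d1 d2 : PySem.Dict Int Int)
    (hg1 : GoodDiag a b (d - 1) d1) (hg2 : GoodDiag a b (d - 2) d2)
    (i : Int) (hi1 : 1 ≤ i) (hin : i ≤ (a.length : Int))
    (hj1 : 1 ≤ d - i) (hjm : d - i ≤ (b.length : Int)) :
    min (d1.getD (i - 1) 0 + 1)
      (min (d1.getD i 0 + 1)
        (d2.getD (i - 1) 0 +
          (if PySem.List.pyGetD a (i - 1) ' ' ≠ PySem.List.pyGetD b (d - i - 1) ' '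
           then (1 : Int) else 0)))
      = levP a b i.toNat (d - i).toNat := by
  have hA : d1.getD (i - 1) 0 = levP a b (i - 1).toNat (d - i).toNat := by
    rw [PySem.Dict.getD_eq_get?_getD, hg1 (i - 1),
      if_pos (by constructor <;> omega : max 0 (d - 1 - (b.length : Int)) ≤ i - 1 ∧ i - 1 ≤ min (a.length : Int) (d - 1))]
    rw [show d - 1 - (i - 1) = d - i by ring]
    rfl
  have hB : d1.getD i 0 = levP a b i.toNat (d - i - 1).toNat := by
    rw [PySem.Dict.getD_eq_get?_getD, hg1 i,
      if_pos (by constructor <;> omega : max 0 (d - 1 - (b.length : Int)) ≤ i ∧ i ≤ min (a.length : Int) (d - 1))]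
    rw [show d - 1 - i = d - i - 1 by ring]
    rfl
  have hC : d2.getD (i - 1) 0 = levP a b (i - 1).toNat (d - i - 1).toNat := by
    rw [PySem.Dict.getD_eq_get?_getD, hg2 (i - 1),
      if_pos (by constructor <;> omega : max 0 (d - 2 - (b.length : Int)) ≤ i - 1 ∧ i - 1 ≤ min (a.length : Int) (d - 2))]
    rw [show d - 2 - (i - 1) = d - i - 1 by ring]
    rfl
  have hia : (i - 1).toNat < a.length := by omega
  have hjb : (d - i - 1).toNat < b.length := by omega
  have ha : PySem.List.pyGetD a (i - 1) ' ' = a.getD (i - 1).toNat ' ' := by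
    rw [PySem.List.pyGetD_eq_getElem a ' ' (by omega) (by omega),
        List.getD_eq_getElem?_getD, List.getElem?_eq_getElem hia]
    rfl
  have hb : PySem.List.pyGetD b (d - i - 1) ' ' = b.getD (d - i - 1).toNat ' ' := by
    rw [PySem.List.pyGetD_eq_getElem b ' ' (by omega) (by omega),
        List.getD_eq_getElem?_getD, List.getElem?_eq_getElem hjb]
    rfl
  have hiN : i.toNat = (i - 1).toNat + 1 := by omega
  have hjN : (d - i).toNat = (d - i - 1).toNat + 1 := by omega
  rw [hA, hB, hC, ha, hb, hiN, hjN]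
  simp only [levP, pvDelta]

-- inserting the next in-band cell preserves the prefix characterization
lemma pvInsert_step (a b : List Char) (d t : Int) (P : PySem.Dict Int Int)
    (hP : ∀ k : Int, P.get? k =
      if max 0 (d - (b.length : Int)) ≤ k ∧ k ≤ min (a.length : Int) d ∧ k < t then
        some (levP a b k.toNat (d - k).toNat) else none)
    (hlo : max 0 (d - (b.length : Int)) ≤ t) (hhi : t ≤ min (a.length : Int) d)
    (v : Int) (hv : v = levP a b t.toNat (d - t).toNat) (k : Int) :
    (P.insert t v).get? k =
      if max 0 (d - (b.length : Int)) ≤ k ∧ k ≤ min (a.length : Int) d ∧ k < t + 1 then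
        some (levP a b k.toNat (d - k).toNat) else none := by
  rw [PySem.Dict.get?_insert, hP k]
  by_cases hk : k = t
  · subst hk
    have hc : max 0 (d - (b.length : Int)) ≤ k ∧ k ≤ min (a.length : Int) d ∧ k < k + 1 :=
      ⟨hlo, hhi, by omega⟩
    rw [if_pos rfl, if_pos hc, hv]
  · rw [if_neg hk]
    split_ifs with h1 h2 <;> first | rfl | (exfalso; omega)

-- the inner fold of port B builds the diagonal-d dict
lemma pvDiagRow_good (a b : List Char) (d : Int) (hd : 0 ≤ d)
    (d2 d1 : PySem.Dict Int Int)
    (hg1 : GoodDiag a b (d - 1) d1) (hg2 : GoodDiag a b (d - 2) d2) :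
    GoodDiag a b d (pvDiagRow a b (a.length : Int) (b.length : Int) d2 d1 d) := by
  unfold pvDiagRow
  have main : ∀ t : Nat, (t : Int) ≤ d + 1 →
      ∀ k : Int,
      ((PySem.List.pyRange 0 (t : Int) 1).foldl
        (fun cur i =>
          if i > (a.length : Int) ∨ d - i > (b.length : Int) then cur
          else if i = 0 then cur.insert i (d - i)
          else if d - i = 0 then cur.insert i i
          else cur.insert i
            (min (d1.getD (i - 1) 0 + 1)
              (min (d1.getD i 0 + 1)
                (d2.getD (i - 1) 0 +
                  (if PySem.List.pyGetD a (i - 1) ' ' ≠ PySem.List.pyGetD b (d - i - 1) ' '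
                   then (1 : Int) else 0)))))
        PySem.Dict.empty).get? k =
      if max 0 (d - (b.length : Int)) ≤ k ∧ k ≤ min (a.length : Int) d ∧ k < (t : Int) then
        some (levP a b k.toNat (d - k).toNat)
      else none := by
    intro t
    induction t with
    | zero =>
        intro _ k
        rw [Nat.cast_zero, PySem.List.pyRange_one_eq_nil le_rfl, List.foldl_nil,
          PySem.Dict.get?_empty]
        split_ifs with h1
        · exfalso; omega
        · rfl
    | succ t ih =>
        intro hle k
        have ht : (0 : Int) ≤ (t : Int) := by omega
        rw [show ((t + 1 : Nat) : Int) = (t : Int) + 1 by push_cast; ring,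
          PySem.List.pyRange_one_succ_right ht, List.foldl_append]
        simp only [List.foldl_cons, List.foldl_nil]
        have ihk := fun k => ih (by omega) k
        by_cases hout : (t : Int) > (a.length : Int) ∨ d - (t : Int) > (b.length : Int)
        · rw [if_pos hout, ihk k]
          split_ifs with h1 h2 h2 <;> first | rfl | (exfalso; omega)
        · rw [if_neg hout]
          by_cases hi0 : (t : Int) = 0
          · rw [if_pos hi0]
            refine pvInsert_step a b d (t : Int) _ ihk (by omega) (by omega) _ ?_ k
            rw [hi0]
            simp [levP]
            omega
          · rw [if_neg hi0]
            by_cases hj0 : d - (t : Int) = 0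
            · rw [if_pos hj0]
              refine pvInsert_step a b d (t : Int) _ ihk (by omega) (by omega) _ ?_ k
              rw [show (d - (t : Int)).toNat = 0 by omega, levP_zero_right]
              omega
            · rw [if_neg hj0]
              refine pvInsert_step a b d (t : Int) _ ihk (by omega) (by omega) _ ?_ k
              exact pvDiag_cell a b d d1 d2 hg1 hg2 (t : Int) (by omega) (by omega)
                (by omega) (by omega)
  intro k
  have ht : ((d + 1).toNat : Int) = d + 1 := by omega
  have hmain := main (d + 1).toNat (by omega) k
  rw [show (d + 1 : Int) = ((d + 1).toNat : Int) from ht.symm, hmain]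
  split_ifs with h1 h2 h2 <;> first | rfl | (exfalso; omega)

-- the outer fold of port B keeps GoodDiag
lemma pvDiagOuter_good (a b : List Char) :
    ∀ (len : Nat) (lo : Int), 0 ≤ lo →
    ∀ st : PySem.Dict Int Int × PySem.Dict Int Int,
    GoodDiag a b (lo - 2) st.1 → GoodDiag a b (lo - 1) st.2 →
    GoodDiag a b (lo + (len : Int) - 1)
      (((PySem.List.pyRange lo (lo + (len : Int)) 1).foldl
        (fun (st : PySem.Dict Int Int × PySem.Dict Int Int) d =>
          (st.2, pvDiagRow a b (a.length : Int) (b.length : Int) st.1 st.2 d))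
        st).2) := by
  intro len
  induction len with
  | zero =>
      intro lo hlo st h1 h2
      rw [Nat.cast_zero, add_zero, PySem.List.pyRange_one_eq_nil le_rfl, List.foldl_nil]
      simpa using h2
  | succ len ih =>
      intro lo hlo st h1 h2
      have hlt : lo < lo + ((len + 1 : Nat) : Int) := by push_cast; omega
      rw [PySem.List.pyRange_one_cons hlt]
      simp only [List.foldl_cons]
      have hrow := pvDiagRow_good a b lo hlo st.1 st.2 h2 h1
      have harith : lo + ((len + 1 : Nat) : Int) = lo + 1 + (len : Int) := by push_cast; ring
      rw [harith]
      exact ih (lo + 1) (by omega)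
        (st.2, pvDiagRow a b (a.length : Int) (b.length : Int) st.1 st.2 lo)
        (by rw [show lo + 1 - 2 = lo - 1 by ring]; exact h2)
        (by rw [show lo + 1 - 1 = lo by ring]; exact hrow)

lemma pvDiagDist_eq (a b : List Char) :
    pvDiagDist a b = pvEditDistance a b := by
  rw [pvEditDistance_eq]
  simp only [pvDiagDist]
  have hgood := pvDiagOuter_good a b (a.length + b.length + 1) 0 le_rfl
    (PySem.Dict.empty, PySem.Dict.empty)
    (goodDiag_empty a b (0 - 2) (by omega)) (goodDiag_empty a b (0 - 1) (by omega))
  rw [show ((a.length : Int) + (b.length : Int) + 1) = 0 + ((a.length + b.length + 1 : Nat) : Int)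
    by push_cast; ring]
  have hidx : 0 + ((a.length + b.length + 1 : Nat) : Int) - 1 = (a.length : Int) + (b.length : Int) := by
    push_cast; ring
  rw [hidx] at hgood
  rw [PySem.Dict.getD_eq_get?_getD, hgood (a.length : Int),
    if_pos (by constructor <;> omega)]
  have h1 : ((a.length : Int) + (b.length : Int) - (a.length : Int)).toNat = b.length := by omega
  have h2 : ((a.length : Int)).toNat = a.length := by omega
  rw [h1, h2]
  rfl

lemma pvIsIn_self (l : List Char) : PySem.Chars.isIn l l = true := by
  simp [PySem.Chars.isIn_iff_infix]

-- ===== VERDICT (by name: the statement is the Claim_ definition above) =====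
theorem find_fuzzy_match_spec : Claim_equal_find_fuzzy_match := by
  intro query candidates threshold _
  unfold Spec_find_fuzzy_match
  have hA : find_fuzzy_match query candidates threshold
      = candidates.foldl
        (fun acc candidate =>
          if (PySem.Str.isIn (PySem.Str.lower query) (PySem.Str.lower candidate)
              || decide (pvDiagDist (PySem.Str.lower query).toList (PySem.Str.lower candidate).toList ≤ threshold))
          then acc ++ [candidate] else acc)
        [] := by
    apply PySem.List.foldl_congr_mem
    intro acc c _
    by_cases h1 : PySem.Str.lower query = PySem.Str.lower c
    · simp [h1, pvIsIn_self]
    · by_cases h2 : PySem.Chars.isIn (PySem.Chars.lower query.toList) (PySem.Chars.lower c.toList) = true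
      · simp [h1, h2]
      · by_cases h3 : pvEditDistance (PySem.Chars.lower query.toList) (PySem.Chars.lower c.toList) ≤ threshold
        · simp [h1, h2, h3, pvDiagDist_eq]
        · simp [h1, h2, h3, pvDiagDist_eq]
  rw [hA, PySem.List.foldl_append_if_eq_filter]
  simp only [List.nil_append]
  rfl
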